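-- pv_equiv track=rewrite | github.com/kjh601/SolvedAC_PS | Python/class 3/20529.가장 가까운 세 사람의 심리적 거리.py | choose_three_mbtis
-- ===== SOURCE A (Python) =====
-- def dist(a, b):
--     count = 0
--     for i in range(4):
--         count += int(a[i] != b[i])
--     return count
--
-- def calculate_dist(a, b, c):
--     return dist(a, b)+dist(b, c)+dist(c, a)
--
-- def choose_three_mbtis(arr):
--     n = len(arr)
--     min_dist = 12
--     for i in range(n):
--         for j in range(i+1, n):
--             for k in range(j+1, n):
--                 min_dist = min(min_dist, calculate_dist(
--                     arr[i], arr[j], arr[k]))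
--     return min_dist
-- ===== SOURCE B (Python) =====
-- def choose_three_mbtis(arr):
--     def d(a, b):
--         return sum(int(a[i] != b[i]) for i in range(4))
--
--     # Keep only the first three copies of each string: the minimum over
--     # triples is unchanged, and heavy duplication collapses before the
--     # cubic search.
--     seen = {}
--     xs = []
--     for s in arr:
--         c = seen.get(s, 0)
--         if c < 3:
--             seen[s] = c + 1
--             xs.append(s)
--
--     def with_pair(a, b, dab, ys):
--         best = 12
--         for c in ys:
--             best = min(best, dab + d(b, c) + d(c, a))
--         return best
--
--     def with_first(a, ys):
--         if len(ys) < 2: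
--             return 12
--         b, rest = ys[0], ys[1:]
--         return min(with_pair(a, b, d(a, b), rest), with_first(a, rest))
--
--     def go(ys):
--         if len(ys) < 3:
--             return 12
--         return min(with_first(ys[0], ys[1:]), go(ys[1:]))
--
--     return go(xs)
-- ===== Notes on version B (the rewrite author's own statement) =====
-- stated objective: faster
-- what changed: B first collapses the input with a hash counter, keeping only the first three copies of each string (the minimum over triples is unchanged, so duplicate-heavy inputs drop from cubic to linear work), and then runs the brute-force search as a structural recursion on list suffixes with the pairwise distance hoisted out of the innermost loop, instead of A's three nested index loops that recompute every distance per triple.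
import Mathlib
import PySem

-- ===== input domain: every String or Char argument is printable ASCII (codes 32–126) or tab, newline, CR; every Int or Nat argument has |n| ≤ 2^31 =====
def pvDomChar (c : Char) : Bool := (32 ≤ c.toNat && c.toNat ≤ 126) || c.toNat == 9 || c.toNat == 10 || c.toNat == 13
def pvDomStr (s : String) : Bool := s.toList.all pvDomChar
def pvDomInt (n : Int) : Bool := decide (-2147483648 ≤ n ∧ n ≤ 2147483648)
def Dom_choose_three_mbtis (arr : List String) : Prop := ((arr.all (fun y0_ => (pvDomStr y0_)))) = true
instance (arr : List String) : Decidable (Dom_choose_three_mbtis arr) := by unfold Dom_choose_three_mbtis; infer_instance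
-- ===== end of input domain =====

-- B collapses duplicates (keeping the first three copies of each string, which leaves the
-- minimum over triples unchanged) and then searches by structural recursion on suffixes
-- with the pairwise distance hoisted; an alternative decomposition of the same task.

-- ===== PORT A =====
-- dist(a, b): Python indexes a[i], b[i] for i in range(4); for strings of length < 4 Python
-- raises IndexError (excluded by Pre_); here the two Option-valued lookups are compared.
def pvDist (a b : String) : Int :=
  (PySem.List.pyRange 0 4 1).foldl
    (fun count i =>
      count + (if PySem.Str.pyGet? a i ≠ PySem.Str.pyGet? b i then (1 : Int) else 0)) 0

def pvCalc (a b c : String) : Int := pvDist a b + pvDist b c + pvDist c a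

def choose_three_mbtis (arr : List String) : Int :=
  let n : Int := (arr.length : Int)
  (PySem.List.pyRange 0 n 1).foldl
    (fun md i =>
      (PySem.List.pyRange (i + 1) n 1).foldl
        (fun md j =>
          (PySem.List.pyRange (j + 1) n 1).foldl
            (fun md k =>
              min md (pvCalc (PySem.List.pyGetD arr i "") (PySem.List.pyGetD arr j "")
                (PySem.List.pyGetD arr k "")))
            md)
        md)
    12

-- ===== PORT B =====
-- d(a, b) in Source B: sum(int(a[i] != b[i]) for i in range(4)); same IndexError caveat as A's dist.
def pvDistB (a b : String) : Int :=
  ((PySem.List.pyRange 0 4 1).map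
    (fun i => if PySem.Str.pyGet? a i ≠ PySem.Str.pyGet? b i then (1 : Int) else 0)).sum

-- the counter loop of Source B: seen = {}; xs = []; for s in arr: …
def pvCap (arr : List String) : List String :=
  (arr.foldl
    (fun (st : PySem.Dict String Int × List String) s =>
      let c := (PySem.Dict.get? st.1 s).getD 0
      if c < 3 then (PySem.Dict.insert st.1 s (c + 1), st.2 ++ [s]) else st)
    (PySem.Dict.empty, [])).2

def pvWithPair (a b : String) (dab : Int) (ys : List String) : Int :=
  ys.foldl (fun best c => min best (dab + pvDistB b c + pvDistB c a)) 12

def pvWithFirst (a : String) : List String → Int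
  | [] => 12
  | [_] => 12
  | b :: rest => min (pvWithPair a b (pvDistB a b) rest) (pvWithFirst a rest)

def pvGo : List String → Int
  | [] => 12
  | [_] => 12
  | [_, _] => 12
  | x :: rest => min (pvWithFirst x rest) (pvGo rest)

def choose_three_mbtis_alt (arr : List String) : Int := pvGo (pvCap arr)

-- ===== PRECONDITION & SPEC =====
-- Pre_ excludes exactly the inputs on which the Python A raises IndexError: three or more
-- strings with at least one of length < 4 (dist then indexes past its end; B raises there too).
def Pre_choose_three_mbtis (arr : List String) : Prop :=
  arr.length < 3 ∨ ∀ s ∈ arr, 4 ≤ s.toList.length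
instance (arr : List String) : Decidable (Pre_choose_three_mbtis arr) := by
  unfold Pre_choose_three_mbtis; infer_instance

def pvWitness_choose_three_mbtis : List String := ["ENTP", "INFJ", "ENTP", "ESTJ"]

def Spec_choose_three_mbtis (arr : List String) (out : Int) : Prop :=
  out = choose_three_mbtis_alt arr
instance (arr : List String) (out : Int) : Decidable (Spec_choose_three_mbtis arr out) := by
  unfold Spec_choose_three_mbtis; infer_instance

-- ===== CLAIM (what is proved, stated in full; the proofs are below) =====
def Claim_equal_choose_three_mbtis : Prop :=
  ∀ (arr : List String), Dom_choose_three_mbtis arr → Pre_choose_three_mbtis arr →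
    Spec_choose_three_mbtis arr (choose_three_mbtis arr)

-- ===== LEMMAS AND PROOFS =====

-- the canonical list of position-ordered pairs and triples of a list
def pairsL : List String → List (String × String)
  | [] => []
  | b :: t => t.map (fun c => (b, c)) ++ pairsL t

def triplesL : List String → List (String × String × String)
  | [] => []
  | a :: t => (pairsL t).map (fun p => (a, p.1, p.2)) ++ triplesL t

-- running minimum of f over a list
def mfold {α : Type} (f : α → Int) (L : List α) (i : Int) : Int :=
  L.foldl (fun m x => min m (f x)) i

theorem mfold_min {α : Type} (f : α → Int) (L : List α) (a i : Int) :
    mfold f L (min a i) = min a (mfold f L i) := by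
  induction L generalizing i with
  | nil => rfl
  | cons x t ih =>
      simp only [mfold, List.foldl_cons] at *
      rw [min_assoc, ih]

theorem mfold_le_init {α : Type} (f : α → Int) (L : List α) (i : Int) :
    mfold f L i ≤ i := by
  induction L generalizing i with
  | nil => exact le_refl i
  | cons x t ih =>
      exact le_trans (ih (min i (f x))) (min_le_left _ _)

theorem mfold_le_mem {α : Type} (f : α → Int) (L : List α) (i : Int)
    {x : α} (hx : x ∈ L) : mfold f L i ≤ f x := by
  induction L generalizing i with
  | nil => cases hx
  | cons y t ih =>
      rcases List.mem_cons.mp hx with h | h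
      · subst h
        exact le_trans (mfold_le_init f t _) (min_le_right _ _)
      · exact ih _ h

theorem le_mfold {α : Type} (f : α → Int) (L : List α) (i v : Int)
    (hi : v ≤ i) (h : ∀ x ∈ L, v ≤ f x) : v ≤ mfold f L i := by
  induction L generalizing i with
  | nil => exact hi
  | cons x t ih =>
      exact ih _ (le_min hi (h x (List.mem_cons_self))) (fun y hy => h y (List.mem_cons_of_mem _ hy))

theorem mfold_append {α : Type} (f : α → Int) (L1 L2 : List α) (i : Int) :
    mfold f (L1 ++ L2) i = mfold f L2 (mfold f L1 i) := by
  simp [mfold, List.foldl_append]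

theorem mfold_map {α β : Type} (f : α → Int) (g : β → α) (M : List β) (i : Int) :
    mfold f (M.map g) i = mfold (fun y => f (g y)) M i := by
  simp [mfold, List.foldl_map]

theorem mfold_of_le {α : Type} (f : α → Int) (L : List α) (i : Int) (h : i ≤ 12) :
    mfold f L i = min i (mfold f L 12) := by
  have hmin : i = min i 12 := (min_eq_left h).symm
  rw [hmin, mfold_min, ← hmin]

theorem mfold_eq_of_dom {α : Type} (f : α → Int) (L1 L2 : List α) (i : Int)
    (h1 : ∀ x ∈ L1, ∃ y ∈ L2, f y ≤ f x)
    (h2 : ∀ x ∈ L2, ∃ y ∈ L1, f y ≤ f x) :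
    mfold f L1 i = mfold f L2 i := by
  apply le_antisymm
  · refine le_mfold f L2 i _ (mfold_le_init f L1 i) (fun x hx => ?_)
    obtain ⟨y, hy, hle⟩ := h2 x hx
    exact le_trans (mfold_le_mem f L1 i hy) hle
  · refine le_mfold f L1 i _ (mfold_le_init f L2 i) (fun x hx => ?_)
    obtain ⟨y, hy, hle⟩ := h1 x hx
    exact le_trans (mfold_le_mem f L2 i hy) hle

def fCalc : String × String × String → Int := fun t => pvCalc t.1 t.2.1 t.2.2

-- ==== A: index loops → suffix recursion → triples ====

def Ginner (a b : String) (ys : List String) (md : Int) : Int :=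
  ys.foldl (fun m c => min m (pvCalc a b c)) md

def Gpair (a : String) : List String → Int → Int
  | [], md => md
  | b :: t, md => Gpair a t (Ginner a b t md)

def Gtri : List String → Int → Int
  | [], md => md
  | x :: t, md => Gtri t (Gpair x t md)

theorem pyGetD_drop (arr : List String) (p : Nat) (b : String) (t : List String)
    (hp : arr.drop p = b :: t) : PySem.List.pyGetD arr (p : Int) "" = b := by
  rw [PySem.List.pyGetD_natCast]
  have h0 : arr[p]? = some b := by
    have h1 : (arr.drop p)[0]? = arr[p + 0]? := List.getElem?_drop
    rw [hp] at h1
    simpa using h1.symm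
  simp [List.getD, h0]

theorem lemA2 (suf : List String) : ∀ (arr : List String) (p : Nat), arr.drop p = suf →
    ∀ (a : String) (md : Int),
    (PySem.List.pyRange (p : Int) (arr.length : Int) 1).foldl
      (fun md j =>
        (PySem.List.pyRange (j + 1) (arr.length : Int) 1).foldl
          (fun md k =>
            min md (pvCalc a (PySem.List.pyGetD arr j "") (PySem.List.pyGetD arr k "")))
          md)
      md
    = Gpair a suf md := by
  induction suf with
  | nil =>
      intro arr p hp a md
      have hlen : arr.length ≤ p := by
        have := congrArg List.length hp; simp at this; omega
      rw [PySem.List.pyRange_one_eq_nil (by exact_mod_cast hlen)]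
      rfl
  | cons b t ih =>
      intro arr p hp a md
      have hlt : p < arr.length := by
        have := congrArg List.length hp; simp at this; omega
      have hdt : arr.drop (p + 1) = t := by
        have h2 : arr.drop (p + 1) = (arr.drop p).drop 1 := by rw [List.drop_drop]
        rw [h2, hp]; rfl
      rw [PySem.List.pyRange_one_cons (by exact_mod_cast hlt)]
      rw [List.foldl_cons]
      have hcast : ((p : Int) + 1) = ((p + 1 : Nat) : Int) := by push_cast; ring
      rw [hcast]
      rw [pyGetD_drop arr p b t hp]
      rw [show ∀ md0 : Int,
          (PySem.List.pyRange ((p + 1 : Nat) : Int) (arr.length : Int) 1).foldl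
            (fun md k => min md (pvCalc a b (PySem.List.pyGetD arr k ""))) md0
          = Ginner a b t md0 from ?_]
      · exact ih arr (p + 1) hdt a _
      · intro md0
        have := PySem.List.foldl_pyRange_pyGetD' arr ""
          (fun m c => min m (pvCalc a b c)) md0 (a := ((p + 1 : Nat) : Int)) (by positivity)
        rw [this]
        simp only [Int.toNat_natCast, hdt, Ginner]

theorem lemA1 (suf : List String) : ∀ (arr : List String) (p : Nat), arr.drop p = suf →
    ∀ (md : Int),
    (PySem.List.pyRange (p : Int) (arr.length : Int) 1).foldl
      (fun md i =>
        (PySem.List.pyRange (i + 1) (arr.length : Int) 1).foldl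
          (fun md j =>
            (PySem.List.pyRange (j + 1) (arr.length : Int) 1).foldl
              (fun md k =>
                min md (pvCalc (PySem.List.pyGetD arr i "") (PySem.List.pyGetD arr j "")
                  (PySem.List.pyGetD arr k "")))
              md)
          md)
      md
    = Gtri suf md := by
  induction suf with
  | nil =>
      intro arr p hp md
      have hlen : arr.length ≤ p := by
        have := congrArg List.length hp; simp at this; omega
      rw [PySem.List.pyRange_one_eq_nil (by exact_mod_cast hlen)]
      rfl
  | cons x t ih =>
      intro arr p hp md
      have hlt : p < arr.length := by
        have := congrArg List.length hp; simp at this; omega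
      have hdt : arr.drop (p + 1) = t := by
        have h2 : arr.drop (p + 1) = (arr.drop p).drop 1 := by rw [List.drop_drop]
        rw [h2, hp]; rfl
      rw [PySem.List.pyRange_one_cons (by exact_mod_cast hlt)]
      rw [List.foldl_cons]
      have hcast : ((p : Int) + 1) = ((p + 1 : Nat) : Int) := by push_cast; ring
      rw [hcast]
      rw [pyGetD_drop arr p x t hp]
      rw [lemA2 t arr (p + 1) hdt x md]
      exact ih arr (p + 1) hdt _

theorem A_eq_Gtri (arr : List String) : choose_three_mbtis arr = Gtri arr 12 := by
  have h := lemA1 arr arr 0 (by simp) 12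
  simpa [choose_three_mbtis] using h

theorem Gpair_pairs (a : String) (xs : List String) (md : Int) :
    Gpair a xs md = mfold (fun p => pvCalc a p.1 p.2) (pairsL xs) md := by
  induction xs generalizing md with
  | nil => rfl
  | cons b t ih =>
      simp only [Gpair, pairsL, mfold_append, mfold_map, ih]
      rfl

theorem Gtri_triples (xs : List String) (md : Int) :
    Gtri xs md = mfold fCalc (triplesL xs) md := by
  induction xs generalizing md with
  | nil => rfl
  | cons x t ih =>
      simp only [Gtri, triplesL, mfold_append, mfold_map, ih, Gpair_pairs]
      rfl

-- ==== B: recursion → triples ====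

theorem sum_map_eq_foldl (L : List Int) (g : Int → Int) :
    ∀ (init : Int), init + (L.map g).sum = L.foldl (fun c i => c + g i) init := by
  induction L with
  | nil => intro init; simp
  | cons x t ih =>
      intro init
      simp only [List.map_cons, List.sum_cons, List.foldl_cons]
      rw [← ih (init + g x)]
      ring

theorem distB_eq (a b : String) : pvDistB a b = pvDist a b := by
  unfold pvDistB pvDist
  have h := sum_map_eq_foldl (PySem.List.pyRange 0 4 1)
    (fun i => if PySem.Str.pyGet? a i ≠ PySem.Str.pyGet? b i then (1 : Int) else 0) 0
  simpa using h

theorem withPair_eq (a b : String) (ys : List String) :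
    pvWithPair a b (pvDistB a b) ys = mfold (fun c => pvCalc a b c) ys 12 := by
  simp only [pvWithPair, mfold, distB_eq, pvCalc]

theorem withFirst_cons (a b : String) (t : List String) :
    pvWithFirst a (b :: t) = min (pvWithPair a b (pvDistB a b) t) (pvWithFirst a t) := by
  cases t with
  | nil => simp [pvWithFirst, pvWithPair]
  | cons c u => rfl

theorem withFirst_pairs (a : String) (ys : List String) :
    pvWithFirst a ys = mfold (fun p => pvCalc a p.1 p.2) (pairsL ys) 12 := by
  induction ys with
  | nil => rfl
  | cons b t ih =>
      rw [withFirst_cons, ih, pairsL, mfold_append, mfold_map, withPair_eq]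
      rw [mfold_of_le _ _ _ (mfold_le_init _ _ _)]

theorem go_cons (x : String) (t : List String) :
    pvGo (x :: t) = min (pvWithFirst x t) (pvGo t) := by
  cases t with
  | nil => simp [pvGo, pvWithFirst]
  | cons y u =>
      cases u with
      | nil => simp [pvGo, pvWithFirst]
      | cons z v => rfl

theorem go_triples (ys : List String) : pvGo ys = mfold fCalc (triplesL ys) 12 := by
  induction ys with
  | nil => rfl
  | cons x t ih =>
      rw [go_cons, ih, triplesL, mfold_append, mfold_map, withFirst_pairs]
      rw [mfold_of_le _ _ _ (mfold_le_init _ _ _)]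
      rfl

-- ==== the cap keeps the minimum over triples ====

def capGo (seen : PySem.Dict String Int) : List String → List String
  | [] => []
  | s :: t =>
      let c := (PySem.Dict.get? seen s).getD 0
      if c < 3 then s :: capGo (PySem.Dict.insert seen s (c + 1)) t else capGo seen t

theorem capFold (t : List String) :
    ∀ (seen : PySem.Dict String Int) (acc : List String),
    (t.foldl
      (fun (st : PySem.Dict String Int × List String) s =>
        let c := (PySem.Dict.get? st.1 s).getD 0
        if c < 3 then (PySem.Dict.insert st.1 s (c + 1), st.2 ++ [s]) else st)
      (seen, acc)).2 = acc ++ capGo seen t := by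
  induction t with
  | nil => simp [capGo]
  | cons s u ih =>
      intro seen acc
      simp only [List.foldl_cons, capGo]
      by_cases h : (PySem.Dict.get? seen s).getD 0 < 3
      · simp only [h, ih]
        simp
      · simp only [if_neg h, ih]

theorem cap_eq_capGo (arr : List String) : pvCap arr = capGo PySem.Dict.empty arr := by
  have h := capFold arr PySem.Dict.empty []
  simpa [pvCap] using h

theorem capGo_sublist (seen : PySem.Dict String Int) (t : List String) :
    (capGo seen t).Sublist t := by
  induction t generalizing seen with
  | nil => simp [capGo]
  | cons s u ih =>
      simp only [capGo]
      split
      · exact List.Sublist.cons₂ _ (ih _)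
      · exact List.Sublist.cons _ (ih _)

theorem count_capGo (t : List String) :
    ∀ (seen : PySem.Dict String Int),
    (∀ v, 0 ≤ ((PySem.Dict.get? seen v).getD 0) ∧ ((PySem.Dict.get? seen v).getD 0) ≤ 3) →
    ∀ v, ((capGo seen t).count v : Int)
      = min (t.count v : Int) (3 - (PySem.Dict.get? seen v).getD 0) := by
  induction t with
  | nil =>
      intro seen hs v
      have := hs v
      simp only [capGo, List.count_nil, Nat.cast_zero]
      omega
  | cons s u ih =>
      intro seen hs v
      simp only [capGo]
      by_cases h : (PySem.Dict.get? seen s).getD 0 < 3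
      · rw [if_pos h]
        have hs' : ∀ w, 0 ≤ ((PySem.Dict.get? (PySem.Dict.insert seen s ((PySem.Dict.get? seen s).getD 0 + 1)) w).getD 0) ∧ ((PySem.Dict.get? (PySem.Dict.insert seen s ((PySem.Dict.get? seen s).getD 0 + 1)) w).getD 0) ≤ 3 := by
          intro w
          by_cases hw : w = s
          · subst hw
            rw [PySem.Dict.get?_insert_self]
            have := hs w; simp only [Option.getD_some]; omega
          · rw [PySem.Dict.get?_insert_of_ne seen _ hw]
            exact hs w
        have iu := ih _ hs' v
        by_cases hv : v = s
        · subst hv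
          rw [List.count_cons_self, List.count_cons_self]
          rw [PySem.Dict.get?_insert_self] at iu
          simp only [Option.getD_some] at iu
          push_cast at iu ⊢
          omega
        · rw [PySem.Dict.get?_insert_of_ne seen _ hv] at iu
          simp only [List.count_cons, beq_iff_eq]
          simp only [Ne.symm hv, if_false]
          exact iu
      · rw [if_neg h]
        have iu := ih _ hs v
        have h3 : (PySem.Dict.get? seen s).getD 0 = 3 := by have := hs s; omega
        by_cases hv : v = s
        · subst hv
          rw [List.count_cons_self, iu, h3]
          have h0 : (0:Int) ≤ (u.count v : Int) := by positivity
          push_cast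
          omega
        · simp only [List.count_cons, beq_iff_eq]
          simp only [Ne.symm hv, if_false]
          exact iu

theorem count_cap (arr : List String) (v : String) :
    (pvCap arr).count v = min (arr.count v) 3 := by
  rw [cap_eq_capGo]
  have hempty : ∀ w, (PySem.Dict.get? (PySem.Dict.empty : PySem.Dict String Int) w).getD 0 = 0 := by
    intro w; simp [PySem.Dict.empty, PySem.Dict.get?]
  have h := count_capGo arr PySem.Dict.empty (fun w => by rw [hempty w]; omega) v
  rw [hempty v] at h
  omega

theorem mem_pairsL (xs : List String) (b c : String) :
    (b, c) ∈ pairsL xs ↔ [b, c].Sublist xs := by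
  induction xs with
  | nil => simp [pairsL]
  | cons x t ih =>
      simp only [pairsL, List.mem_append, List.mem_map, ih]
      constructor
      · rintro (⟨y, hy, heq⟩ | hs)
        · have h1 : b = x ∧ c = y := by
            injection heq with h1 h2; exact ⟨h1.symm, h2.symm⟩
          obtain ⟨rfl, rfl⟩ := h1
          exact (List.cons_sublist_cons).mpr (List.singleton_sublist.mpr hy)
        · exact hs.cons x
      · intro hs
        rcases List.sublist_cons_iff.mp hs with h | ⟨r, hr, hrs⟩
        · right; exact h
        · left
          obtain rfl : r = [c] := by cases hr; rfl
          have hb : b = x := by cases hr; rfl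
          subst hb
          exact ⟨c, List.singleton_sublist.mp hrs, rfl⟩

theorem mem_triplesL (xs : List String) (a b c : String) :
    (a, b, c) ∈ triplesL xs ↔ [a, b, c].Sublist xs := by
  induction xs with
  | nil => simp [triplesL]
  | cons x t ih =>
      simp only [triplesL, List.mem_append, List.mem_map, ih]
      constructor
      · rintro (⟨p, hp, heq⟩ | hs)
        · have h1 : a = x ∧ b = p.1 ∧ c = p.2 := by
            injection heq with h1 h2; injection h2 with h2 h3; exact ⟨h1.symm, h2.symm, h3.symm⟩
          obtain ⟨rfl, rfl, rfl⟩ := h1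
          exact (List.cons_sublist_cons).mpr ((mem_pairsL t _ _).mp (by simpa using hp))
        · exact hs.cons x
      · intro hs
        rcases List.sublist_cons_iff.mp hs with h | ⟨r, hr, hrs⟩
        · right; exact h
        · left
          have ha : a = x := by cases hr; rfl
          have hr2 : r = [b, c] := by cases hr; rfl
          subst ha; subst hr2
          exact ⟨(b, c), (mem_pairsL t b c).mpr hrs, rfl⟩

theorem dist_symm (a b : String) : pvDist a b = pvDist b a := by
  unfold pvDist
  suffices h : ∀ (L : List Int) (init : Int),
      L.foldl (fun count i => count + (if PySem.Str.pyGet? a i ≠ PySem.Str.pyGet? b i then (1 : Int) else 0)) init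
        = L.foldl (fun count i => count + (if PySem.Str.pyGet? b i ≠ PySem.Str.pyGet? a i then (1 : Int) else 0)) init by
    exact h _ 0
  intro L
  induction L with
  | nil => intro init; rfl
  | cons x t ih =>
      intro init
      simp only [List.foldl_cons]
      rw [ih]
      by_cases hx : PySem.Str.pyGet? a x = PySem.Str.pyGet? b x
      · rw [if_neg (fun hc => hc hx), if_neg (fun hc => hc hx.symm)]
      · rw [if_pos hx, if_pos (Ne.symm hx)]

theorem calc_rot (a b c : String) : pvCalc a b c = pvCalc b c a := by
  simp only [pvCalc]; ring

theorem calc_comm (x y z : String) : pvCalc x y z = pvCalc x z y := by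
  simp only [pvCalc]
  rw [dist_symm x y, dist_symm y z, dist_symm z x]
  ring

theorem perm2_cases {α : Type} {l : List α} {a b : α} (h : l.Perm [a, b]) :
    l = [a, b] ∨ l = [b, a] := by
  have hlen := h.length_eq
  match l, hlen with
  | [x, y], _ =>
    have hx : x ∈ [a, b] := h.mem_iff.mp (by simp)
    rcases List.mem_pair.mp hx with rfl | rfl
    · have h1 : [y].Perm [b] := h.cons_inv
      left; simp [List.perm_singleton.mp h1]
    · have hswap : ([a, x] : List α).Perm [x, a] := List.Perm.swap _ _ _
      have h1 : [y].Perm [a] := (h.trans hswap).cons_inv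
      right; simp [List.perm_singleton.mp h1]

theorem perm3_cases {α : Type} {l : List α} {a b c : α} (h : l.Perm [a, b, c]) :
    l = [a, b, c] ∨ l = [a, c, b] ∨ l = [b, a, c] ∨ l = [b, c, a] ∨
      l = [c, a, b] ∨ l = [c, b, a] := by
  have hlen := h.length_eq
  match l, hlen with
  | [x, y, z], _ =>
    have hx : x ∈ [a, b, c] := h.mem_iff.mp (by simp)
    simp only [List.mem_cons, List.not_mem_nil, or_false] at hx
    rcases hx with rfl | rfl | rfl
    · rcases perm2_cases h.cons_inv with h2 | h2 <;> simp [h2]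
    · have hswap : ([a, x, c] : List α).Perm (x :: [a, c]) := List.Perm.swap _ _ _
      rcases perm2_cases (h.trans hswap).cons_inv with h2 | h2 <;> simp [h2]
    · have hp : ([a, b, x] : List α).Perm (x :: [a, b]) := by
        refine List.Perm.trans ?_ (List.Perm.swap _ _ _)
        exact List.Perm.cons a (List.Perm.swap _ _ _)
      rcases perm2_cases (h.trans hp).cons_inv with h2 | h2 <;> simp [h2]

theorem cap_triples (arr : List String) :
    mfold fCalc (triplesL (pvCap arr)) 12 = mfold fCalc (triplesL arr) 12 := by
  apply mfold_eq_of_dom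
  · rintro ⟨a, b, c⟩ hx
    refine ⟨(a, b, c), ?_, le_refl _⟩
    have hsub : [a, b, c].Sublist (pvCap arr) := (mem_triplesL _ a b c).mp hx
    have hcap : (pvCap arr).Sublist arr := by
      rw [cap_eq_capGo]; exact capGo_sublist _ _
    exact (mem_triplesL _ a b c).mpr (hsub.trans hcap)
  · rintro ⟨a, b, c⟩ hx
    have hsub : [a, b, c].Sublist arr := (mem_triplesL _ a b c).mp hx
    have hsp : [a, b, c].Subperm (pvCap arr) := by
      rw [List.subperm_ext_iff]
      intro v _
      have h1 : [a, b, c].count v ≤ 3 := le_trans (List.count_le_length) (by simp)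
      have h2 : [a, b, c].count v ≤ arr.count v := hsub.count_le v
      rw [count_cap]
      omega
    obtain ⟨l, hperm, hsubl⟩ := hsp
    rcases perm3_cases hperm with h6 | h6 | h6 | h6 | h6 | h6 <;> subst h6
    · exact ⟨(a, b, c), (mem_triplesL _ a b c).mpr hsubl, le_refl _⟩
    · exact ⟨(a, c, b), (mem_triplesL _ a c b).mpr hsubl,
        le_of_eq (show fCalc (a, c, b) = fCalc (a, b, c) from (calc_comm a b c).symm)⟩
    · exact ⟨(b, a, c), (mem_triplesL _ b a c).mpr hsubl,
        le_of_eq (show fCalc (b, a, c) = fCalc (a, b, c) from by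
          show pvCalc b a c = pvCalc a b c
          rw [calc_rot b a c, calc_comm a c b, calc_comm a b c])⟩
    · exact ⟨(b, c, a), (mem_triplesL _ b c a).mpr hsubl,
        le_of_eq (show fCalc (b, c, a) = fCalc (a, b, c) from (calc_rot a b c).symm)⟩
    · exact ⟨(c, a, b), (mem_triplesL _ c a b).mpr hsubl,
        le_of_eq (show fCalc (c, a, b) = fCalc (a, b, c) from
          ((calc_rot a b c).trans (calc_rot b c a)).symm)⟩
    · exact ⟨(c, b, a), (mem_triplesL _ c b a).mpr hsubl,
        le_of_eq (show fCalc (c, b, a) = fCalc (a, b, c) from by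
          show pvCalc c b a = pvCalc a b c
          rw [calc_rot c b a, calc_comm b a c, calc_rot b c a, calc_rot c a b])⟩

-- ===== VERDICT (by name: the statement is the Claim_ definition above) =====
theorem choose_three_mbtis_spec : Claim_equal_choose_three_mbtis := by
  intro arr _ _
  show choose_three_mbtis arr = choose_three_mbtis_alt arr
  rw [A_eq_Gtri, Gtri_triples, choose_three_mbtis_alt, go_triples, cap_triples]
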